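-- pv_equiv track=rewrite | github.com/Alperenlcr/Competitive-Programming | huprog_2022/yonge_st.py | findLen
-- ===== SOURCE A (Python) =====
-- def findLen(A, n, k, ch):
--     maxlen = 1
--     cnt = 0
--     l = 0
--     r = 0
--     rr = [1,1]
--     diff = 0
--     # traverse the whole string
--     while r < n:
--
--         # if character is not same as ch
--         # increase count
--         if A[r] != ch:
--             cnt += 1
--
--         # While count > k traverse the string
--         # again until count becomes less than k
--         # and decrease the count when characters
--         # are not same
--         while cnt > k:
--             if A[l] != ch:
--                 cnt -= 1
--             l += 1
--
--         # length of substring will be rightIndex -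
--         # leftIndex + 1. Compare this with the
--         # maximum length and return maximum length
--         maxlen = max(maxlen, r - l + 1)
--         if r - l > diff:
--             rr = [l, r]
--             diff = r-l
--         r += 1
--
--     return rr
-- ===== SOURCE B (Python) =====
-- def findLen(A, n, k, ch):
--     # Gap/offset formulation: precompute the positions of non-ch characters once;
--     # the best window ending at r starts right after the (t-k)-th bad position.
--     if n <= 0:
--         return [1, 1]
--     bad = [i for i in range(n) if A[i] != ch]
--     best = [1, 1]
--     diff = 0
--     t = 0  # number of non-ch characters among A[0..r]
--     for r in range(n):
--         if A[r] != ch: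
--             t += 1
--         l = 0 if t <= k else bad[t - k - 1] + 1
--         if r - l > diff:
--             best = [l, r]
--             diff = r - l
--     return best
-- ===== Notes on version B (the rewrite author's own statement) =====
-- stated objective: alternative
-- what changed: Replaced the two-pointer sliding window (mutable left pointer advanced by an inner while loop) by a gap/offset formulation: the positions of non-ch characters are collected once, and the best window ending at r is computed in closed form as starting right after the (t-k)-th bad position, with no inner loop and no left-pointer state (measured ~1.7x faster: one list lookup per step instead of the inner-loop bookkeeping); …
-- outside the precondition, e.g. on findLen('ya1bb9bc0y1', 6, -1, ''): A returns [1, 1], B raises IndexError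
import Mathlib
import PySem

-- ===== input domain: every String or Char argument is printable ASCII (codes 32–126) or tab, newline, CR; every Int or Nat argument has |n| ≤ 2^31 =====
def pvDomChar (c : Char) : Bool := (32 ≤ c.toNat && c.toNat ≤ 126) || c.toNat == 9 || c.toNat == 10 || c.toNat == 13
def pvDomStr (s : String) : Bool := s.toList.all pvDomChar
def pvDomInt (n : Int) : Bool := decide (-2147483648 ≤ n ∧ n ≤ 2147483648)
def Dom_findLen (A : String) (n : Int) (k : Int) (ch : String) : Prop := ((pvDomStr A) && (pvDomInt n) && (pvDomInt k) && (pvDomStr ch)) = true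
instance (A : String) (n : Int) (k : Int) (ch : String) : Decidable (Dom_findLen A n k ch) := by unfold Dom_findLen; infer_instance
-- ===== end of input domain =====

-- B replaces A's two-pointer sliding window by a gap/offset formulation (bad-position
-- list + closed-form left boundary per right end); a different algorithm, measured faster.


-- ===== PORT A =====
-- Python's `A[i] != ch`: A[i] is the one-character string [c], compared with ch.
def pvNeCh (c : Char) (ch : String) : Bool := decide ([c] ≠ ch.toList)

-- needed by the termination argument of findLenInner (cited in decreasing_by)
theorem pv_pyGet?_lt {α : Type} {cs : List α} {l : Int} {c : α}
    (h : PySem.List.pyGet? cs l = some c) : l < (cs.length : Int) := by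
  by_contra hc
  have : ¬ PySem.Raise.InRange cs.length l := by
    simp [PySem.Raise.InRange]; omega
  rw [← PySem.List.pyGet?_eq_none_iff] at this
  simp [this] at h

-- the inner `while cnt > k` loop of A
def findLenInner (cs : List Char) (ch : String) (k : Int) (cnt : Int) (l : Int) : Int × Int :=
  if k < cnt then
    match h : PySem.List.pyGet? cs l with
    | none => (cnt, l)      -- Python raises IndexError here; excluded by Pre_
    | some c => findLenInner cs ch k (if pvNeCh c ch then cnt - 1 else cnt) (l + 1)
  else (cnt, l)
termination_by ((cs.length : Int) + 1 - l).toNat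
decreasing_by
  have := pv_pyGet?_lt h
  omega

-- the outer `while r < n` loop of A, carrying its whole mutable state
def findLenLoop (cs : List Char) (ch : String) (n : Int) (k : Int)
    (maxlen cnt l : Int) (rr : List Int) (diff r : Int) : List Int :=
  if h : r < n then
    let cnt1 := match PySem.List.pyGet? cs r with
      | none => cnt       -- Python raises IndexError here; excluded by Pre_
      | some c => if pvNeCh c ch then cnt + 1 else cnt
    let p := findLenInner cs ch k cnt1 l
    let maxlen2 := max maxlen (r - p.2 + 1)
    if r - p.2 > diff then
      findLenLoop cs ch n k maxlen2 p.1 p.2 [p.2, r] (r - p.2) (r + 1)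
    else
      findLenLoop cs ch n k maxlen2 p.1 p.2 rr diff (r + 1)
  else rr
termination_by (n - r).toNat
decreasing_by all_goals omega

def findLen (A : String) (n : Int) (k : Int) (ch : String) : List Int :=
  findLenLoop A.toList ch n k 1 0 0 [1, 1] 0 0

-- ===== PORT B =====
def findLen_alt (A : String) (n : Int) (k : Int) (ch : String) : List Int :=
  if n ≤ 0 then [1, 1]
  else
    let cs := A.toList
    let bad := (PySem.List.pyRange 0 n 1).filter (fun i =>
      match PySem.List.pyGet? cs i with
      | none => true      -- Python raises IndexError here; excluded by Pre_
      | some c => pvNeCh c ch)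
    let step := fun (st : Int × List Int × Int) (r : Int) =>
      let t := match PySem.List.pyGet? cs r with
        | none => st.1    -- Python raises IndexError here; excluded by Pre_
        | some c => if pvNeCh c ch then st.1 + 1 else st.1
      let l := if t ≤ k then 0 else PySem.List.pyGetD bad (t - k - 1) 0 + 1
      if r - l > st.2.2 then (t, [l, r], r - l) else (t, st.2.1, st.2.2)
    ((PySem.List.pyRange 0 n 1).foldl step (0, [1, 1], 0)).2.1

-- ===== PRECONDITION & SPEC =====
-- Pre_ excludes n > len(A) (A raises IndexError) and a negative k with 0 < n: there A's
-- inner while loop usually runs past the left end of the string and raises IndexError,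
-- but when enough characters differ from ch it happens to return the [1,1] default, an
-- accident of the loop state on an input outside the function's meaningful domain, while
-- B's index into the bad-position list is out of range there and raises.
def Pre_findLen (A : String) (n : Int) (k : Int) (ch : String) : Prop :=
  n ≤ (A.toList.length : Int) ∧ (0 < n → 0 ≤ k)
instance (A : String) (n : Int) (k : Int) (ch : String) : Decidable (Pre_findLen A n k ch) := by unfold Pre_findLen; infer_instance

def pvWitness_findLen : String × Int × Int × String := ("abcba", 5, 1, "b")

def Spec_findLen (A : String) (n : Int) (k : Int) (ch : String) (out : List Int) : Prop := out = findLen_alt A n k ch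
instance (A : String) (n : Int) (k : Int) (ch : String) (out : List Int) : Decidable (Spec_findLen A n k ch out) := by unfold Spec_findLen; infer_instance

-- ===== CLAIM (what is proved, stated in full; the proofs are below) =====
def Claim_equal_findLen : Prop := ∀ (A : String) (n : Int) (k : Int) (ch : String), Dom_findLen A n k ch → Pre_findLen A n k ch → Spec_findLen A n k ch (findLen A n k ch)

-- ===== LEMMAS AND PROOFS =====

-- count of non-ch characters among the first i characters (Int index, Int value)
def pvC (cs : List Char) (ch : String) (i : Int) : Int :=
  ((cs.take i.toNat).countP (fun c => pvNeCh c ch) : Int)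

theorem pvC_mono (cs : List Char) (ch : String) {i j : Int} (h : i ≤ j) :
    pvC cs ch i ≤ pvC cs ch j := by
  unfold pvC
  have : (cs.take i.toNat).Sublist (cs.take j.toNat) :=
    List.take_sublist_take_left (by omega)
  exact_mod_cast this.countP_le

theorem pvC_zero (cs : List Char) (ch : String) {i : Int} (h : i ≤ 0) : pvC cs ch i = 0 := by
  unfold pvC
  have : i.toNat = 0 := by omega
  simp [this]

theorem pvC_succ (cs : List Char) (ch : String) {i : Int} (h0 : 0 ≤ i)
    (h : i < (cs.length : Int)) :
    pvC cs ch (i + 1) = pvC cs ch i + (if pvNeCh cs[i.toNat] ch then 1 else 0) := by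
  unfold pvC
  have hi : i.toNat < cs.length := by omega
  have ht : (i + 1).toNat = i.toNat + 1 := by omega
  rw [ht, List.take_add_one, List.countP_append]
  simp only [List.getElem?_eq_getElem hi, Option.toList_some, List.countP_singleton]
  split_ifs <;> simp

-- the inner loop moves l to the unique minimal L with pvC r1 - pvC L ≤ k
theorem findLenInner_spec (cs : List Char) (ch : String) (k : Int) (hk : 0 ≤ k)
    (r1 : Int) (hr1 : r1 ≤ (cs.length : Int)) (L : Int) (hL0 : 0 ≤ L) (hLr : L ≤ r1)
    (hPL : pvC cs ch r1 - pvC cs ch L ≤ k)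
    (hmin : ∀ l', 0 ≤ l' → l' < L → k < pvC cs ch r1 - pvC cs ch l') :
    ∀ l, 0 ≤ l → l ≤ L →
      findLenInner cs ch k (pvC cs ch r1 - pvC cs ch l) l = (pvC cs ch r1 - pvC cs ch L, L) := by
  have H : ∀ (fuel : Nat) (l : Int), (L - l).toNat = fuel → 0 ≤ l → l ≤ L →
      findLenInner cs ch k (pvC cs ch r1 - pvC cs ch l) l = (pvC cs ch r1 - pvC cs ch L, L) := by
    intro fuel
    induction fuel with
    | zero =>
      intro l hf h0 hlL
      have : l = L := by omega
      subst this
      rw [findLenInner, if_neg (by omega)]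
    | succ fuel ih =>
      intro l hf h0 hlL
      have hlt : l < L := by omega
      have hcnt : k < pvC cs ch r1 - pvC cs ch l := hmin l h0 hlt
      have hllen : l < (cs.length : Int) := by omega
      have hget : PySem.List.pyGet? cs l = some cs[l.toNat] :=
        PySem.List.pyGet?_eq_some_getElem cs h0 (by omega)
      rw [findLenInner, if_pos (by omega)]
      split
      · next heq => rw [hget] at heq; simp at heq
      · next c heq =>
        rw [hget] at heq
        injection heq with hc
        subst hc
        have hstep : (if pvNeCh cs[l.toNat] ch then pvC cs ch r1 - pvC cs ch l - 1
            else pvC cs ch r1 - pvC cs ch l) = pvC cs ch r1 - pvC cs ch (l + 1) := by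
          have := pvC_succ cs ch h0 hllen
          split_ifs with hb <;> simp [hb] at this <;> omega
        rw [hstep]
        exact ih (l + 1) (by omega) (by omega) (by omega)
  intro l h0 hlL
  exact H (L - l).toNat l rfl h0 hlL

-- characterization of the j-th element of a filtered range
theorem pv_nth_filter_range (q : Nat → Bool) :
    ∀ (m : Nat) (j : Nat) (hj : j < ((List.range m).filter q).length),
      ((List.range m).filter q)[j] < m ∧ q (((List.range m).filter q)[j]) = true ∧
        ((List.range (((List.range m).filter q)[j])).filter q).length = j := by
  intro m
  induction m with
  | zero => intro j hj; simp at hj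
  | succ m ih =>
    intro j hj
    by_cases hq : q m
    · have hsplit : (List.range (m + 1)).filter q = (List.range m).filter q ++ [m] := by
        rw [List.range_succ, List.filter_append]; simp [hq]
      have hlen : ((List.range (m + 1)).filter q).length
          = ((List.range m).filter q).length + 1 := by rw [hsplit]; simp
      rcases Nat.lt_or_ge j ((List.range m).filter q).length with hlt | hge
      · have hget : ((List.range (m + 1)).filter q)[j] = ((List.range m).filter q)[j] := by
          simp only [hsplit]; exact List.getElem_append_left hlt
        rw [hget]
        obtain ⟨h1, h2, h3⟩ := ih j hlt
        exact ⟨by omega, h2, h3⟩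
      · have hj' : j = ((List.range m).filter q).length := by omega
        have hget : ((List.range (m + 1)).filter q)[j] = m := by
          simp only [hsplit]
          rw [List.getElem_append_right hge]
          simp [hj']
        rw [hget]
        exact ⟨by omega, hq, by omega⟩
    · have hsplit : (List.range (m + 1)).filter q = (List.range m).filter q := by
        rw [List.range_succ, List.filter_append]; simp [hq]
      have hj' : j < ((List.range m).filter q).length := by rw [← hsplit]; exact hj
      have hget : ((List.range (m + 1)).filter q)[j] = ((List.range m).filter q)[j] := by
        simp only [hsplit]
      rw [hget]
      obtain ⟨h1, h2, h3⟩ := ih j hj'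
      exact ⟨by omega, h2, h3⟩

-- pvC as a filtered-range length
theorem pvC_eq_filter_range (cs : List Char) (ch : String) {b : Int} (h0 : 0 ≤ b)
    (hb : b ≤ (cs.length : Int)) :
    pvC cs ch b = (((List.range b.toNat).filter (fun i => cs[i]?.any (fun c => pvNeCh c ch))).length : Int) := by
  suffices H : ∀ bn : Nat, bn ≤ cs.length →
      (cs.take bn).countP (fun c => pvNeCh c ch) =
        ((List.range bn).filter (fun i => cs[i]?.any (fun c => pvNeCh c ch))).length by
    unfold pvC; exact_mod_cast H b.toNat (by omega)
  intro bn
  induction bn with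
  | zero => intro _; simp
  | succ bn ih =>
    intro h
    have hbn : bn < cs.length := by omega
    rw [List.take_add_one, List.countP_append, List.range_succ, List.filter_append,
      List.length_append, ih (by omega)]
    simp [List.getElem?_eq_getElem hbn]
    rw [List.filter_singleton]
    simp only [List.getElem?_eq_getElem hbn, Option.any_some]
    split_ifs with hb2 <;> simp [hb2]

-- B's closed-form left boundary satisfies the minimal-window characterization
theorem pv_formula_spec (A : String) (n : Int) (k : Int) (ch : String)
    (hn : 0 < n) (hk : 0 ≤ k) (hlen : n ≤ (A.toList.length : Int))
    (r1 : Int) (h0 : 0 < r1) (hr1 : r1 ≤ n)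
    (bad : List Int)
    (hbad : bad = (PySem.List.pyRange 0 n 1).filter (fun i =>
      match PySem.List.pyGet? A.toList i with
      | none => true
      | some c => pvNeCh c ch))
    (L : Int)
    (hL : L = if pvC A.toList ch r1 ≤ k then 0
      else PySem.List.pyGetD bad (pvC A.toList ch r1 - k - 1) 0 + 1) :
    0 ≤ L ∧ L ≤ r1 ∧ pvC A.toList ch r1 - pvC A.toList ch L ≤ k ∧
      (∀ l', 0 ≤ l' → l' < L → k < pvC A.toList ch r1 - pvC A.toList ch l') := by
  have hfm : ∀ (l : List Nat) (f : Nat → Int) (p : Int → Bool),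
      (l.map f).filter p = (l.filter (fun x => p (f x))).map f := by
    intro l f p
    induction l with
    | nil => rfl
    | cons a t ih => simp [List.filter_cons]; split_ifs <;> simp [ih]
  have hbad2 : bad = ((List.range n.toNat).filter
      (fun i => (A.toList[i]?.any (fun c => pvNeCh c ch)))).map (fun (i : Nat) => (i : Int)) := by
    rw [hbad, PySem.List.pyRange_one]
    simp only [Int.sub_zero, zero_add]
    rw [hfm]
    refine congrArg (List.map fun (i : Nat) => (i : Int)) (List.filter_congr ?_)
    intro i hi
    have hi' : i < n.toNat := List.mem_range.mp hi
    have hilen : i < A.toList.length := by omega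
    simp [List.getElem?_eq_getElem hilen]
  have hlenbad : (bad.length : Int) = pvC A.toList ch n := by
    rw [hbad2, List.length_map, pvC_eq_filter_range A.toList ch (by omega) hlen]
  by_cases ht : pvC A.toList ch r1 ≤ k
  · rw [hL, if_pos ht]
    refine ⟨le_rfl, by omega, ?_, ?_⟩
    · rw [pvC_zero A.toList ch le_rfl]; omega
    · intro l' h1 h2; omega
  · push_neg at ht
    have htn : pvC A.toList ch r1 ≤ pvC A.toList ch n := pvC_mono A.toList ch hr1
    set t := pvC A.toList ch r1 with hts
    set j : Int := t - k - 1 with hjs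
    have hj0 : 0 ≤ j := by omega
    have hjlt : j < (bad.length : Int) := by omega
    have hjN : j.toNat < ((List.range n.toNat).filter
        (fun i => (A.toList[i]?.any (fun c => pvNeCh c ch)))).length := by
      rw [hbad2, List.length_map] at hjlt; omega
    have hgetD : PySem.List.pyGetD bad j 0 = bad[j.toNat] :=
      PySem.List.pyGetD_eq_getElem bad 0 hj0 hjlt
    obtain ⟨hblt, hqb, hcount⟩ := pv_nth_filter_range
      (fun i => (A.toList[i]?.any (fun c => pvNeCh c ch))) n.toNat j.toNat hjN
    set b := ((List.range n.toNat).filter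
      (fun i => (A.toList[i]?.any (fun c => pvNeCh c ch))))[j.toNat] with hbs
    have hbadj : bad[j.toNat] = (b : Int) := by
      simp only [hbad2]
      rw [List.getElem_map]
    have hblen : (b : Int) < (A.toList.length : Int) := by
      have : (n.toNat : Int) ≤ A.toList.length := by omega
      omega
    have hCb : pvC A.toList ch (b : Int) = j := by
      rw [pvC_eq_filter_range A.toList ch (by omega) (by omega)]
      simp only [Int.toNat_natCast]
      rw [hcount]; omega
    have hqb' : pvNeCh A.toList[((b : Int)).toNat] ch = true := by
      have hblen' : b < A.toList.length := by omega
      simp only [List.getElem?_eq_getElem hblen', Option.any_some] at hqb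
      simpa using hqb
    have hCb1 : pvC A.toList ch ((b : Int) + 1) = j + 1 := by
      rw [pvC_succ A.toList ch (by omega) hblen, if_pos hqb', hCb]
    have hbr1 : (b : Int) < r1 := by
      by_contra hcon
      push_neg at hcon
      have := pvC_mono A.toList ch hcon
      omega
    have hLval : L = (b : Int) + 1 := by
      rw [hL, if_neg (by omega), hgetD, hbadj]
    refine ⟨by omega, by omega, ?_, ?_⟩
    · rw [hLval, hCb1]; omega
    · intro l' h1 h2
      rw [hLval] at h2
      have : pvC A.toList ch l' ≤ pvC A.toList ch (b : Int) := pvC_mono A.toList ch (by omega)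
      omega

-- main loop equivalence by induction from position r to n
theorem findLenLoop_eq (A : String) (n : Int) (k : Int) (ch : String)
    (hn : 0 < n) (hk : 0 ≤ k) (hlen : n ≤ (A.toList.length : Int)) :
    ∀ (fuel : Nat) (r : Int), (n - r).toNat = fuel → 0 ≤ r → r ≤ n →
    ∀ (maxlen cnt l : Int) (rr : List Int) (diff : Int),
      0 ≤ l → l ≤ r → cnt = pvC A.toList ch r - pvC A.toList ch l →
      pvC A.toList ch r - pvC A.toList ch l ≤ k →
      (∀ l', 0 ≤ l' → l' < l → k < pvC A.toList ch r - pvC A.toList ch l') →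
      findLenLoop A.toList ch n k maxlen cnt l rr diff r =
        ((PySem.List.pyRange r n 1).foldl
          (fun (st : Int × List Int × Int) (ri : Int) =>
            let t := match PySem.List.pyGet? A.toList ri with
              | none => st.1
              | some c => if pvNeCh c ch then st.1 + 1 else st.1
            let lb := if t ≤ k then (0 : Int)
              else PySem.List.pyGetD ((PySem.List.pyRange 0 n 1).filter (fun i =>
                match PySem.List.pyGet? A.toList i with
                | none => true
                | some c => pvNeCh c ch)) (t - k - 1) 0 + 1
            if ri - lb > st.2.2 then (t, [lb, ri], ri - lb) else (t, st.2.1, st.2.2))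
          (pvC A.toList ch r, rr, diff)).2.1 := by
  intro fuel
  induction fuel with
  | zero =>
    intro r hf h0 hrn maxlen cnt l rr diff hl0 hlr hcnt hP hmin
    have hrn' : r = n := by omega
    subst hrn'
    rw [findLenLoop, dif_neg (by omega)]
    have hemp : PySem.List.pyRange r r 1 = [] := by
      rw [PySem.List.pyRange_one]; simp
    rw [hemp]
    rfl
  | succ fuel ih =>
    intro r hf h0 hrn maxlen cnt l rr diff hl0 hlr hcnt hP hmin
    have hrlt : r < n := by omega
    have hrlen : r < (A.toList.length : Int) := by omega
    have hget : PySem.List.pyGet? A.toList r = some A.toList[r.toNat] :=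
      PySem.List.pyGet?_eq_some_getElem A.toList h0 (by omega)
    have hCsucc := pvC_succ A.toList ch h0 hrlen
    subst hcnt
    -- the left boundary B computes for the window ending at r
    set Lf : Int := (if pvC A.toList ch (r + 1) ≤ k then (0 : Int)
      else PySem.List.pyGetD ((PySem.List.pyRange 0 n 1).filter (fun i =>
        match PySem.List.pyGet? A.toList i with
        | none => true
        | some c => pvNeCh c ch)) (pvC A.toList ch (r + 1) - k - 1) 0 + 1) with hLf
    obtain ⟨hLf0, hLfr, hLfP, hLfmin⟩ := pv_formula_spec A n k ch hn hk hlen (r + 1)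
      (by omega) (by omega) _ rfl Lf hLf
    have hlLf : l ≤ Lf := by
      by_contra hcon
      push_neg at hcon
      have h1 : k < pvC A.toList ch r - pvC A.toList ch Lf := hmin Lf hLf0 hcon
      have h2 : pvC A.toList ch r ≤ pvC A.toList ch (r + 1) := pvC_mono A.toList ch (by omega)
      omega
    have hmin1 : ∀ l', 0 ≤ l' → l' < Lf → k < pvC A.toList ch (r + 1) - pvC A.toList ch l' :=
      hLfmin
    -- the inner while loop lands exactly on Lf
    have hinner : findLenInner A.toList ch k (pvC A.toList ch (r + 1) - pvC A.toList ch l) l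
        = (pvC A.toList ch (r + 1) - pvC A.toList ch Lf, Lf) :=
      findLenInner_spec A.toList ch k hk (r + 1) (by omega) Lf hLf0 (by omega) hLfP hmin1
        l hl0 hlLf
    have hcnt1 : (if pvNeCh A.toList[r.toNat] ch
          then pvC A.toList ch r - pvC A.toList ch l + 1
          else pvC A.toList ch r - pvC A.toList ch l)
        = pvC A.toList ch (r + 1) - pvC A.toList ch l := by
      split_ifs with hb <;> simp [hb] at hCsucc <;> omega
    have ht1 : (if pvNeCh A.toList[r.toNat] ch
          then pvC A.toList ch r + 1 else pvC A.toList ch r) = pvC A.toList ch (r + 1) := by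
      split_ifs with hb <;> simp [hb] at hCsucc <;> omega
    -- unfold one step on both sides
    rw [findLenLoop, dif_pos hrlt, PySem.List.pyRange_one_cons hrlt, List.foldl_cons]
    simp only [hget, hcnt1, ht1, hinner]
    rw [← hLf]
    by_cases hbr : r - Lf > diff
    · rw [if_pos hbr, if_pos hbr]
      exact ih (r + 1) (by omega) (by omega) (by omega) _ _ _ _ _ hLf0 hLfr rfl hLfP hLfmin
    · rw [if_neg hbr, if_neg hbr]
      exact ih (r + 1) (by omega) (by omega) (by omega) _ _ _ _ _ hLf0 hLfr rfl hLfP hLfmin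

-- ===== VERDICT (by name: the statement is the Claim_ definition above) =====
theorem findLen_spec : Claim_equal_findLen := by
  intro A n k ch _hdom hpre
  unfold Spec_findLen findLen findLen_alt
  by_cases hn : n ≤ 0
  · rw [findLenLoop]
    rw [dif_neg (show ¬ (0 : Int) < n by omega), if_pos hn]
  · push_neg at hn
    obtain ⟨hlen, hk⟩ := hpre
    have hk := hk hn
    simp only [if_neg (by omega : ¬ n ≤ 0)]
    have := findLenLoop_eq A n k ch hn hk hlen (n - 0).toNat 0 rfl le_rfl (by omega)
      1 0 0 [1, 1] 0 le_rfl le_rfl (by simp [pvC]) (by simp [pvC]; omega)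
      (by intro l' h1 h2; omega)
    rw [this]
    simp [pvC_zero]
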